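-- pv_equiv track=rewrite | github.com/germanebr/Document-analysis-agent | document_comparison_agent_graph.py | _order_refs
-- ===== SOURCE A (Python) =====
-- def _order_refs(refs):
--     """Orders the given references by document and by page."""
--     references = {}
--     for block in refs:
--         for key in block.keys():
--             references[key] = []
--
--     for block in refs:
--         for key,values in block.items():
--             references[key] += values
--
--     for key,values in references.items():
--         references[key] = sorted(values, key=lambda item: item["page_row"])
--
--     return references
-- ===== SOURCE B (Python) =====
-- def _order_refs(refs):
--     """Orders the given references by document and by page.
--
--     No mutable dict accumulation: keys are collected in first-appearance
--     order, then the result is built directly as a comprehension mapping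
--     each key to the sorted concatenation of its values gathered by a scan."""
--     keys = []
--     for block in refs:
--         for key in block:
--             if key not in keys:
--                 keys.append(key)
--     return {k: sorted([item
--                        for block in refs
--                        for k2, values in block.items() if k2 == k
--                        for item in values],
--                       key=lambda item: item["page_row"])
--             for k in keys}
-- ===== Notes on version B (the rewrite author's own statement) =====
-- stated objective: alternative
-- what changed: B drops A's mutable dict accumulation entirely: it collects the keys in first-appearance order with a membership-checked list, then builds the result in one comprehension mapping each key to the sorted concatenation of its values gathered by scanning the blocks.
import Mathlib
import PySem

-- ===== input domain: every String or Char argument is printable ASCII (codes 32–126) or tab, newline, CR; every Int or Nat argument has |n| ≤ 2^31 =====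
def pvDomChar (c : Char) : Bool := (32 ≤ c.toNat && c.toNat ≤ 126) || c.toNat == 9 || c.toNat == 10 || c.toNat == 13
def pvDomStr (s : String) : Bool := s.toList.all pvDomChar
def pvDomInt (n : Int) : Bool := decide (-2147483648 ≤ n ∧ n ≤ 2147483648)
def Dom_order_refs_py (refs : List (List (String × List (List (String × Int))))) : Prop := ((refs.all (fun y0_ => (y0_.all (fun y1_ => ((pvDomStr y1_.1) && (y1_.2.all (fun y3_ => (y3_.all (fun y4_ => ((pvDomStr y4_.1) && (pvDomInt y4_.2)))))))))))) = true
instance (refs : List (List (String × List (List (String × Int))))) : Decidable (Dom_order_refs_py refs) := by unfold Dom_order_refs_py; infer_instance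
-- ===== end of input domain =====

-- B replaces A's mutable dict accumulation by a first-appearance key list plus a per-key
-- gather-and-sort comprehension; equality of the returned values is proved.

-- item["page_row"] (an item is a Python dict); total via default 0 — exact on Pre_, where the key is present
def pvPageRow (it : List (String × Int)) : Int := (PySem.Dict.mk it).getD "page_row" 0

-- ===== PORT A =====
def order_refs_py (refs : List (List (String × List (List (String × Int))))) : List (String × List (List (String × Int))) :=
  -- references = {}; for block in refs: for key in block.keys(): references[key] = []
  let d1 := refs.foldl (fun d block => block.foldl (fun d kv => d.insert kv.1 ([] : List (List (String × Int)))) d) PySem.Dict.empty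
  -- for block in refs: for key, values in block.items(): references[key] += values   (key always seeded, so getD is exact)
  let d2 := refs.foldl (fun d block => block.foldl (fun d kv => d.insert kv.1 (d.getD kv.1 [] ++ kv.2)) d) d1
  -- for key, values in references.items(): references[key] = sorted(values, key=lambda item: item["page_row"])
  let d3 := d2.items.foldl (fun d p => d.insert p.1 (PySem.List.sorted p.2 pvPageRow)) d2
  d3.items

-- ===== PORT B =====
def order_refs_py_alt (refs : List (List (String × List (List (String × Int))))) : List (String × List (List (String × Int))) :=
  -- keys = []; for block in refs: for key in block: if key not in keys: keys.append(key)
  let keys := refs.foldl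
    (fun ks block => block.foldl
      (fun ks kv => if ks.contains kv.1 then ks else ks ++ [kv.1]) ks) []
  -- {k: sorted([item for block in refs for k2, values in block.items() if k2 == k
  --             for item in values], key=lambda item: item["page_row"]) for k in keys}
  keys.map (fun k =>
    (k, PySem.List.sorted
          (refs.flatMap (fun block =>
            block.flatMap (fun kv => if kv.1 == k then kv.2 else [])))
          pvPageRow))

-- ===== PRECONDITION & SPEC =====
-- Pre_ excludes inputs where some item dict lacks the key "page_row": there Python A (and B) raise KeyError in the sort key.
def Pre_order_refs_py (refs : List (List (String × List (List (String × Int))))) : Prop :=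
  (refs.all fun block => block.all fun kv => kv.2.all fun it => it.any fun f => f.1 == "page_row") = true
instance (refs : List (List (String × List (List (String × Int))))) : Decidable (Pre_order_refs_py refs) := by unfold Pre_order_refs_py; infer_instance
def pvWitness_order_refs_py : (List (List (String × List (List (String × Int))))) :=
  [[("a", [[("page_row", 3)], [("page_row", 1)]]), ("b", [[("page_row", 2)]])], [("a", [[("page_row", 1)]])]]
def Spec_order_refs_py (refs : List (List (String × List (List (String × Int))))) (out : List (String × List (List (String × Int)))) : Prop := out = order_refs_py_alt refs
instance (refs : List (List (String × List (List (String × Int))))) (out : List (String × List (List (String × Int)))) : Decidable (Spec_order_refs_py refs out) := by unfold Spec_order_refs_py; infer_instance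

-- ===== CLAIM (what is proved, stated in full; the proofs are below) =====
def Claim_equal_order_refs_py : Prop := ∀ (refs : List (List (String × List (List (String × Int))))), Dom_order_refs_py refs → Pre_order_refs_py refs → Spec_order_refs_py refs (order_refs_py refs)

-- ===== LEMMAS AND PROOFS =====

-- the nested block/key loops are one loop over the flattened (key, values) pairs
theorem pv_foldl_foldl {α β : Type} (l : List (List α)) (f : β → α → β) (d : β) :
    l.foldl (fun d block => block.foldl f d) d = (l.flatMap id).foldl f d := by
  induction l generalizing d with
  | nil => rfl
  | cons b t ih => simp [List.flatMap_cons, List.foldl_append, ih]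

def pvP (refs : List (List (String × List (List (String × Int))))) : List (String × List (List (String × Int))) :=
  refs.flatMap id
def pvSeed (refs : List (List (String × List (List (String × Int))))) : PySem.Dict String (List (List (String × Int))) :=
  (pvP refs).foldl (fun d kv => d.insert kv.1 ([] : List (List (String × Int)))) PySem.Dict.empty
def pvGather (refs : List (List (String × List (List (String × Int))))) (k : String) : List (List (String × Int)) :=
  ((pvP refs).filter (fun kv => kv.1 == k)).flatMap (·.2)

theorem pv_seed_getD {κ β : Type} [BEq κ] [LawfulBEq κ] [DecidableEq κ]
    (P : List (κ × β)) (d : PySem.Dict κ (List (List (String × Int)))) (k : κ)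
    (h : d.getD k [] = []) :
    (P.foldl (fun d kv => d.insert kv.1 ([] : List (List (String × Int)))) d).getD k [] = [] := by
  induction P generalizing d with
  | nil => exact h
  | cons p t ih =>
    simp only [List.foldl_cons]
    exact ih _ (by rw [PySem.Dict.getD_insert]; split <;> simp [h])

theorem pv_A_getD {κ : Type} [BEq κ] [LawfulBEq κ] [DecidableEq κ] {β : Type}
    (P : List (κ × List β)) (d : PySem.Dict κ (List β)) (k : κ) :
    (P.foldl (fun d kv => d.insert kv.1 (d.getD kv.1 [] ++ kv.2)) d).getD k []
      = d.getD k [] ++ (P.filter (fun kv => kv.1 == k)).flatMap (·.2) := by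
  induction P generalizing d with
  | nil => simp
  | cons p t ih =>
    simp only [List.foldl_cons, List.filter_cons]
    by_cases hk : p.1 = k
    · subst hk
      simp [ih]
    · have : (p.1 == k) = false := by simp [hk]
      simp [this, ih, PySem.Dict.getD_insert, Ne.symm hk]

-- writing each existing key once, in items order: reads after the loop
theorem pv_write_not_mem {κ ν : Type} [BEq κ] [LawfulBEq κ] [DecidableEq κ]
    (l : List (κ × ν)) (f : ν → ν) (d : PySem.Dict κ ν) (k : κ) (df : ν)
    (h : k ∉ l.map Prod.fst) :
    (l.foldl (fun d p => d.insert p.1 (f p.2)) d).getD k df = d.getD k df := by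
  induction l generalizing d with
  | nil => rfl
  | cons p t ih =>
    simp only [List.map_cons, List.mem_cons, not_or] at h
    simp only [List.foldl_cons]
    rw [ih _ h.2, PySem.Dict.getD_insert, if_neg h.1]

theorem pv_write_mem {κ ν : Type} [BEq κ] [LawfulBEq κ] [DecidableEq κ]
    (l : List (κ × ν)) (f : ν → ν) (d : PySem.Dict κ ν) (k : κ) (v : ν) (df : ν)
    (hnd : (l.map Prod.fst).Nodup) (hm : (k, v) ∈ l) :
    (l.foldl (fun d p => d.insert p.1 (f p.2)) d).getD k df = f v := by
  induction l generalizing d with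
  | nil => cases hm
  | cons p t ih =>
    simp only [List.map_cons, List.nodup_cons] at hnd
    simp only [List.foldl_cons]
    rcases List.mem_cons.mp hm with h | h
    · subst h
      rw [pv_write_not_mem _ _ _ _ _ hnd.1]
      rw [PySem.Dict.getD_insert]; simp
    · exact ih _ hnd.2 h

theorem pv_update_of_subset {α : Type} [BEq α] [LawfulBEq α]
    (xs : List α) (s : PySem.Set α) (h : ∀ x ∈ xs, x ∈ s) :
    PySem.Set.update s xs = s := by
  induction xs generalizing s with
  | nil => rfl
  | cons x t ih =>
    have hx : PySem.Set.add s x = s := by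
      unfold PySem.Set.add
      simp [h x (by simp)]
    show PySem.Set.update (PySem.Set.add s x) t = s
    rw [hx]
    exact ih s (fun y hy => h y (by simp [hy]))

-- seed dict facts
theorem pv_seed_keys (refs : List (List (String × List (List (String × Int))))) :
    (pvSeed refs).keys = PySem.Set.ofList ((pvP refs).map Prod.fst) := by
  unfold pvSeed
  rw [PySem.Dict.keys_foldl_insert_key (pvP refs) Prod.fst (fun _ _ => []) PySem.Dict.empty]
  simp [PySem.Set.update_nil_left]

theorem pv_seed_nodup (refs : List (List (String × List (List (String × Int))))) :
    (pvSeed refs).keys.Nodup :=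
  PySem.Dict.nodup_keys_foldl_insert_key _ Prod.fst (fun _ _ => []) _ (by simp)

-- seed dict lookups are all []
theorem pv_seed_getD0 (refs : List (List (String × List (List (String × Int))))) (k : String) :
    (pvSeed refs).getD k [] = [] := by
  unfold pvSeed
  exact pv_seed_getD _ _ _ (by simp)

-- characterisation of A: keys in first-appearance order, each mapped to its sorted gathered values
theorem pv_A_char (refs : List (List (String × List (List (String × Int))))) :
    order_refs_py refs
      = (pvSeed refs).keys.map (fun k => (k, PySem.List.sorted (pvGather refs k) pvPageRow)) := by
  simp only [order_refs_py]
  rw [pv_foldl_foldl, pv_foldl_foldl]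
  show (((pvP refs).foldl (fun d kv => d.insert kv.1 (d.getD kv.1 [] ++ kv.2)) (pvSeed refs)).items.foldl
      (fun d p => d.insert p.1 (PySem.List.sorted p.2 pvPageRow))
      ((pvP refs).foldl (fun d kv => d.insert kv.1 (d.getD kv.1 [] ++ kv.2)) (pvSeed refs))).items
    = (pvSeed refs).keys.map (fun k => (k, PySem.List.sorted (pvGather refs k) pvPageRow))
  set d2 := (pvP refs).foldl (fun d kv => d.insert kv.1 (d.getD kv.1 [] ++ kv.2)) (pvSeed refs) with hd2
  have hd2getD : ∀ k, d2.getD k [] = pvGather refs k := by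
    intro k
    rw [hd2, pv_A_getD, pv_seed_getD0]
    simp [pvGather]
  have hd2keys : d2.keys = (pvSeed refs).keys := by
    rw [hd2, PySem.Dict.keys_foldl_insert_key (pvP refs) Prod.fst (fun d kv => d.getD kv.1 [] ++ kv.2)]
    exact pv_update_of_subset _ _ (fun x hx => by
      rw [pv_seed_keys]
      exact (PySem.Set.mem_ofList _ _).mpr hx)
  have hd2nd : d2.keys.Nodup := hd2keys ▸ pv_seed_nodup refs
  set d3 := d2.items.foldl (fun d p => d.insert p.1 (PySem.List.sorted p.2 pvPageRow)) d2 with hd3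
  have hd3keys : d3.keys = d2.keys := by
    rw [hd3, PySem.Dict.keys_foldl_insert_key d2.items Prod.fst (fun d p => PySem.List.sorted p.2 pvPageRow)]
    exact pv_update_of_subset _ _ (fun x hx => hx)
  have hd3nd : d3.keys.Nodup := hd3keys ▸ hd2nd
  rw [PySem.Dict.items_eq_map_keys d3 hd3nd [], hd3keys, hd2keys]
  refine List.map_congr_left (fun k hk => ?_)
  have hkd2 : k ∈ d2.keys := hd2keys ▸ hk
  have hmem : (k, d2.getD k []) ∈ d2.items := by
    rw [PySem.Dict.items_eq_map_keys d2 hd2nd []]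
    exact List.mem_map.mpr ⟨k, hkd2, rfl⟩
  have hndfst : (d2.items.map Prod.fst).Nodup := hd2nd
  rw [hd3, pv_write_mem d2.items (fun v => PySem.List.sorted v pvPageRow) d2 k (d2.getD k []) [] hndfst hmem, hd2getD]

-- B's membership-checked key loop is exactly set(…) accumulation: first appearances in order
theorem pv_keys_foldl {κ β : Type} [BEq κ] [LawfulBEq κ]
    (l : List (κ × β)) (s : List κ) :
    l.foldl (fun ks kv => if ks.contains kv.1 then ks else ks ++ [kv.1]) s
      = PySem.Set.update s (l.map Prod.fst) := by
  induction l generalizing s with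
  | nil => rfl
  | cons p t ih =>
    show t.foldl _ (if s.contains p.1 then s else s ++ [p.1])
        = PySem.Set.update (PySem.Set.add s p.1) (t.map Prod.fst)
    rw [ih]
    have : (if s.contains p.1 = true then s else s ++ [p.1]) = PySem.Set.add s p.1 := by
      simp [PySem.Set.add, PySem.Set.contains]
    rw [this]

-- B's guarded gather is the filtered gather
theorem pv_gather_eq {κ β : Type} [BEq κ] (l : List (κ × List β)) (k : κ) :
    l.flatMap (fun kv => if kv.1 == k then kv.2 else [])
      = (l.filter (fun kv => kv.1 == k)).flatMap (·.2) := by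
  induction l with
  | nil => rfl
  | cons p t ih =>
    simp only [List.flatMap_cons, List.filter_cons]
    by_cases h : (p.1 == k) = true <;> simp [h, ih]

-- characterisation of B: the same keys, each mapped to the same sorted gather
theorem pv_B_char (refs : List (List (String × List (List (String × Int))))) :
    order_refs_py_alt refs
      = (pvSeed refs).keys.map (fun k => (k, PySem.List.sorted (pvGather refs k) pvPageRow)) := by
  simp only [order_refs_py_alt]
  rw [pv_foldl_foldl, pv_keys_foldl, pv_seed_keys, ← PySem.Set.update_nil_left]
  refine List.map_congr_left (fun k _ => ?_)
  have hflat : refs.flatMap (fun block => block.flatMap (fun kv => if kv.1 == k then kv.2 else []))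
      = (pvP refs).flatMap (fun kv => if kv.1 == k then kv.2 else []) := by
    unfold pvP; rw [List.flatMap_assoc]; rfl
  rw [hflat, pv_gather_eq]
  rfl

-- ===== VERDICT (by name: the statement is the Claim_ definition above) =====
theorem order_refs_py_spec : Claim_equal_order_refs_py := by
  intro refs _ _
  unfold Spec_order_refs_py
  rw [pv_A_char, pv_B_char]
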